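-- pv_equiv track=rewrite | github.com/GitMonsters/octotetrahedral-agi | arc-puzzle-catalog/re-arc/solves/00a961a6/solver.py | transform
-- ===== SOURCE A (Python) =====
-- from collections import Counter
--
-- def transform(input_grid: list[list[int]]) -> list[list[int]]:
--     rows = len(input_grid)
--     cols = len(input_grid[0])
--
--     # Compute column modes (for vertical stripes hypothesis)
--     col_modes = []
--     for c in range(cols):
--         col_vals = [input_grid[r][c] for r in range(rows)]
--         col_modes.append(Counter(col_vals).most_common(1)[0][0])
--
--     # Compute row modes (for horizontal stripes hypothesis)
--     row_modes = []
--     for r in range(rows):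
--         row_modes.append(Counter(input_grid[r]).most_common(1)[0][0])
--
--     # Count how many input cells match each hypothesis
--     v_match = sum(1 for r in range(rows) for c in range(cols) if col_modes[c] == input_grid[r][c])
--     h_match = sum(1 for r in range(rows) for c in range(cols) if row_modes[r] == input_grid[r][c])
--
--     if v_match >= h_match:
--         return [col_modes[:] for _ in range(rows)]
--     else:
--         return [[row_modes[r]] * cols for r in range(rows)]
-- ===== SOURCE B (Python) =====
-- from collections import Counter
--
-- def transform(input_grid: list[list[int]]) -> list[list[int]]:
--     rows = len(input_grid)
--     cols = len(input_grid[0])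
--
--     # One Counter per column: its top entry gives both the mode and, summed,
--     # the vertical match total -- no second full-grid scan needed.
--     col_modes, v_match = [], 0
--     for col in zip(*input_grid):
--         mode, count = Counter(col).most_common(1)[0]
--         col_modes.append(mode)
--         v_match += count
--
--     row_modes, h_match = [], 0
--     for row in input_grid:
--         mode, count = Counter(row).most_common(1)[0]
--         row_modes.append(mode)
--         h_match += count
--
--     if v_match >= h_match:
--         return [list(col_modes) for _ in range(rows)]
--     return [[mode] * cols for mode in row_modes]
-- ===== Notes on version B (the rewrite author's own statement) =====
-- stated objective: alternative
-- what changed: B transposes the grid once with zip(*grid) and reads each column's/row's mode AND its frequency from Counter(...).most_common(1)[0], accumulating the match totals from those frequencies, so A's two extra full-grid rescans against col_modes/row_modes disappear.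
-- outside the precondition, e.g. on transform([[5, 5], [5, 5, 7, 7, 7]]): A returns [[5, 5], [5, 5]], B returns [[5, 5], [7, 7]]
import Mathlib
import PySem

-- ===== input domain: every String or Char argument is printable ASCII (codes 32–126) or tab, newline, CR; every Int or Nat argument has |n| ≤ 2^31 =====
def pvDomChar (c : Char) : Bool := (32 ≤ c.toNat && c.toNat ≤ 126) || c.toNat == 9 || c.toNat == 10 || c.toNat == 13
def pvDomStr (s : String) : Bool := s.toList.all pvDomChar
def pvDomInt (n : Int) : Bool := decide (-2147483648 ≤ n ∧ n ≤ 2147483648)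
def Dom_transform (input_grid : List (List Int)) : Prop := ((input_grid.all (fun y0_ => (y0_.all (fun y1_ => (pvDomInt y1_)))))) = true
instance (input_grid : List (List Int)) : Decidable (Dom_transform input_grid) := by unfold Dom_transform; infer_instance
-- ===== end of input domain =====

-- B derives the match totals directly from the per-column / per-row Counter's top entry (mode, count)
-- instead of A's two extra full-grid rescans; objective: alternative decomposition, same complexity.


-- ===== PORT A =====
-- shared helper: Counter(xs).most_common(1)[0] — both Pythons call exactly this.
-- CPython's most_common(1) is max(items) by count, first-encountered wins ties;
-- [] is where Python raises IndexError (excluded by Pre_).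
def pyMostCommon1 (items : List (Int × Int)) : Int × Int :=
  match items with
  | [] => (0, 0)
  | p :: rest => rest.foldl (fun best q => if q.2 > best.2 then q else best) p

def transform (input_grid : List (List Int)) : List (List Int) :=
  let rows : Int := input_grid.length
  let cols : Int := (PySem.List.pyGetD input_grid 0 []).length
  let colModes : List Int := (PySem.List.pyRange 0 cols 1).map (fun c =>
    let colVals := (PySem.List.pyRange 0 rows 1).map (fun r =>
      PySem.List.pyGetD (PySem.List.pyGetD input_grid r []) c 0)
    (pyMostCommon1 (PySem.Dict.counter colVals).items).1)
  let rowModes : List Int := (PySem.List.pyRange 0 rows 1).map (fun r =>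
    (pyMostCommon1 (PySem.Dict.counter (PySem.List.pyGetD input_grid r [])).items).1)
  let vMatch : Int := ((PySem.List.pyRange 0 rows 1).map (fun r =>
    ((PySem.List.pyRange 0 cols 1).map (fun c =>
      if PySem.List.pyGetD colModes c 0 == PySem.List.pyGetD (PySem.List.pyGetD input_grid r []) c 0 then (1:Int) else 0)).sum)).sum
  let hMatch : Int := ((PySem.List.pyRange 0 rows 1).map (fun r =>
    ((PySem.List.pyRange 0 cols 1).map (fun c =>
      if PySem.List.pyGetD rowModes r 0 == PySem.List.pyGetD (PySem.List.pyGetD input_grid r []) c 0 then (1:Int) else 0)).sum)).sum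
  if vMatch ≥ hMatch then
    (PySem.List.pyRange 0 rows 1).map (fun _ => colModes)
  else
    (PySem.List.pyRange 0 rows 1).map (fun r => List.replicate cols.toNat (PySem.List.pyGetD rowModes r 0))

-- ===== PORT B =====
-- zip(*g): tuples of the rows' elements up to the shortest row (Python's zip truncates)
def pyZipStar (g : List (List Int)) : List (List Int) :=
  match g with
  | [] => []
  | _ => (List.range ((g.map List.length).min?.getD 0)).map (fun i => g.map (fun row => row.getD i 0))

def transform_alt (input_grid : List (List Int)) : List (List Int) :=
  let rows : Nat := input_grid.length
  let cols : Nat := (PySem.List.pyGetD input_grid 0 []).length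
  let p := (pyZipStar input_grid).foldl (fun (acc : List Int × Int) col =>
    (acc.1 ++ [(pyMostCommon1 (PySem.Dict.counter col).items).1],
     acc.2 + (pyMostCommon1 (PySem.Dict.counter col).items).2)) ([], 0)
  let q := input_grid.foldl (fun (acc : List Int × Int) row =>
    (acc.1 ++ [(pyMostCommon1 (PySem.Dict.counter row).items).1],
     acc.2 + (pyMostCommon1 (PySem.Dict.counter row).items).2)) ([], 0)
  if p.2 ≥ q.2 then (List.range rows).map (fun _ => p.1)
  else q.1.map (fun m => List.replicate cols m)

-- ===== PRECONDITION & SPEC =====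
-- Pre_ excludes the inputs where A raises IndexError (empty grid, empty first row —
-- Counter([]).most_common(1)[0] — or a row shorter than the first) and the ragged grids
-- with rows LONGER than the first, on which A's row modes/matches read cells beyond the
-- grid's column range: an artefact no caller with a rectangular ARC grid can see.
def Pre_transform (input_grid : List (List Int)) : Prop :=
  input_grid ≠ [] ∧ (input_grid.headD []) ≠ [] ∧
  ∀ row ∈ input_grid, row.length = (input_grid.headD []).length
instance (input_grid : List (List Int)) : Decidable (Pre_transform input_grid) := by unfold Pre_transform; infer_instance

def pvWitness_transform : List (List Int) := [[1, 2], [2, 2]]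

def Spec_transform (input_grid : List (List Int)) (out : List (List Int)) : Prop := out = transform_alt input_grid
instance (input_grid : List (List Int)) (out : List (List Int)) : Decidable (Spec_transform input_grid out) := by unfold Spec_transform; infer_instance

-- ===== CLAIM (what is proved, stated in full; the proofs are below) =====
def Claim_equal_transform : Prop := ∀ (input_grid : List (List Int)), Dom_transform input_grid → Pre_transform input_grid → Spec_transform input_grid (transform input_grid)

-- ===== LEMMAS AND PROOFS =====

-- the mode and its stored count, as both programs compute them
def mcMode (l : List Int) : Int := (pyMostCommon1 (PySem.Dict.counter l).items).1
def mcCnt (l : List Int) : Int := (pyMostCommon1 (PySem.Dict.counter l).items).2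

-- the common shape both ports are reduced to
def pvCanon (g : List (List Int)) : List (List Int) :=
  let R := g.length
  let C := (g.headD []).length
  let colModes := (List.range C).map (fun c => mcMode ((List.range R).map (fun r => (g.getD r []).getD c 0)))
  if ((List.range C).map (fun c => mcCnt ((List.range R).map (fun r => (g.getD r []).getD c 0)))).sum
       ≥ ((List.range R).map (fun r => mcCnt (g.getD r []))).sum then
    (List.range R).map (fun _ => colModes)
  else (List.range R).map (fun r => List.replicate C (mcMode (g.getD r [])))


theorem pyMostCommon1_mem (items : List (Int × Int)) (h : items ≠ []) :
    pyMostCommon1 items ∈ items := by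
  match items, h with
  | p :: rest, _ =>
    have H : ∀ (l : List (Int × Int)) (b : Int × Int),
        l.foldl (fun best q => if q.2 > best.2 then q else best) b = b ∨
        l.foldl (fun best q => if q.2 > best.2 then q else best) b ∈ l := by
      intro l
      induction l with
      | nil => intro b; exact Or.inl rfl
      | cons q t ih =>
        intro b
        simp only [List.foldl_cons]
        rcases ih (if q.2 > b.2 then q else b) with h1 | h1
        · rw [h1]
          split
          · exact Or.inr (by simp)
          · exact Or.inl rfl
        · exact Or.inr (List.mem_cons_of_mem _ h1)
    show rest.foldl (fun best q => if q.2 > best.2 then q else best) p ∈ p :: rest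
    rcases H rest p with h1 | h1
    · rw [h1]; simp
    · exact List.mem_cons_of_mem _ h1

theorem mcCnt_eq_count (l : List Int) (h : l ≠ []) :
    mcCnt l = (l.count (mcMode l) : Int) := by
  have hne : (PySem.Dict.counter l).items ≠ [] := by
    rw [PySem.Dict.items_counter]
    match l, h with
    | a :: t, _ =>
      have hmem : a ∈ PySem.Set.ofList (a :: t) := by
        rw [PySem.Set.mem_ofList]; simp
      simp only [ne_eq, List.map_eq_nil_iff]
      intro hc; rw [hc] at hmem; simp at hmem
  have hmem := pyMostCommon1_mem _ hne
  rw [PySem.Dict.items_counter] at hmem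
  obtain ⟨k, hk, he⟩ := List.mem_map.mp hmem
  unfold mcCnt mcMode
  rw [PySem.Dict.items_counter, ← he]

theorem map_eq_map_range {α β : Type} (l : List α) (f : α → β) (d : α) :
    l.map f = (List.range l.length).map (fun i => f (l.getD i d)) := by
  apply List.ext_getElem
  · simp
  · intro i h1 h2
    simp only [List.getElem_map, List.getElem_range]
    congr 1
    rw [List.getD_eq_getElem?_getD, List.getElem?_eq_getElem (by simpa using h1)]
    rfl

theorem count_eq_sum_range (l : List Int) (m : Int) :
    ((List.range l.length).map (fun i => if m == l.getD i 0 then (1:Int) else 0)).sum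
      = (l.count m : Int) := by
  rw [← map_eq_map_range l (fun x => if m == x then (1:Int) else 0) 0]
  rw [PySem.List.sum_map_ite_one_zero (fun x => m == x) l]
  congr 1
  rw [List.count_eq_countP]
  refine List.countP_congr (fun x _ => ?_)
  by_cases hmx : m = x
  · subst hmx; rfl
  · rw [beq_eq_false_iff_ne.mpr hmx, beq_eq_false_iff_ne.mpr (fun e => hmx e.symm)]

theorem sum_range_list_finset (n : Nat) (g : Nat → Int) :
    ((List.range n).map g).sum = ∑ i ∈ Finset.range n, g i := by
  induction n with
  | zero => simp
  | succ k ih =>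
    rw [List.range_succ, Finset.sum_range_succ, List.map_append, List.sum_append, ih]
    simp

theorem sum_range_swap (R C : Nat) (f : Nat → Nat → Int) :
    ((List.range R).map (fun r => ((List.range C).map (fun c => f r c)).sum)).sum
      = ((List.range C).map (fun c => ((List.range R).map (fun r => f r c)).sum)).sum := by
  rw [sum_range_list_finset, sum_range_list_finset]
  simp only [sum_range_list_finset]
  exact Finset.sum_comm

theorem min?_all_eq (l : List Nat) (C : Nat) (h : l ≠ []) (hall : ∀ x ∈ l, x = C) :
    l.min? = some C := by
  have hrep : l = List.replicate l.length C := List.eq_replicate_of_mem hall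
  have hpos : 0 < l.length := by
    cases l with | nil => exact absurd rfl h | cons a t => simp
  conv_lhs => rw [hrep]
  exact List.min?_replicate_of_pos hpos

theorem sum_ind_eq_mc (l : List Int) (hl : l ≠ []) :
    ((List.range l.length).map (fun i =>
      if ((pyMostCommon1 (PySem.Dict.counter l).items).1 == l.getD i 0) then (1:Int) else 0)).sum
      = (pyMostCommon1 (PySem.Dict.counter l).items).2 := by
  rw [count_eq_sum_range l ((pyMostCommon1 (PySem.Dict.counter l).items).1)]
  exact (mcCnt_eq_count l hl).symm

theorem transform_eq_canon (g : List (List Int)) (h : Pre_transform g) :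
    transform g = pvCanon g := by
  obtain ⟨hne, hh, hlen⟩ := h
  have hget0 : (PySem.List.pyGetD g 0 []) = g.headD [] := by
    rw [PySem.List.pyGetD_zero]
    cases g with | nil => exact absurd rfl hne | cons a t => rfl
  have hR : 0 < g.length := List.length_pos_iff.mpr hne
  have hC : 0 < (g.headD []).length := List.length_pos_iff.mpr hh
  have hrowlen : ∀ r : Nat, r < g.length → (g.getD r []).length = (g.headD []).length := by
    intro r hr
    have hmem : g.getD r [] ∈ g := by
      rw [List.getD_eq_getElem?_getD, List.getElem?_eq_getElem hr]
      exact List.getElem_mem hr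
    exact hlen _ hmem
  have hrowne : ∀ r : Nat, r < g.length → g.getD r [] ≠ [] := by
    intro r hr he
    have h2 := hrowlen r hr
    rw [he, List.length_nil] at h2
    omega
  have hcolne : ∀ c : Nat, (List.range g.length).map (fun r => (g.getD r []).getD c 0) ≠ [] := by
    intro c
    simp only [ne_eq, List.map_eq_nil_iff, List.range_eq_nil]
    omega
  unfold transform pvCanon
  simp only [hget0, PySem.List.pyRange_zero_natCast, List.map_map, Function.comp_def,
             PySem.List.pyGetD_natCast, mcMode, mcCnt, Int.toNat_natCast]
  -- replace col_modes[c] lookups by the column mode itself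
  have step1 : ∀ r : Nat,
      (List.range (g.headD []).length).map (fun c =>
        if (((List.range (g.headD []).length).map (fun c' =>
              (pyMostCommon1 (PySem.Dict.counter ((List.range g.length).map
                (fun r' => (g.getD r' []).getD c' 0))).items).1)).getD c 0
            == (g.getD r []).getD c 0) then (1:Int) else 0)
      = (List.range (g.headD []).length).map (fun c =>
          if ((pyMostCommon1 (PySem.Dict.counter ((List.range g.length).map
                (fun r' => (g.getD r' []).getD c 0))).items).1
              == (g.getD r []).getD c 0) then (1:Int) else 0) := by
    intro r
    exact List.map_congr_left (fun c hc => by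
      rw [PySem.List.getD_map_range _ _ _ _ (List.mem_range.mp hc)])
  simp only [step1]
  rw [sum_range_swap g.length (g.headD []).length (fun r c =>
      if ((pyMostCommon1 (PySem.Dict.counter ((List.range g.length).map
            (fun r' => (g.getD r' []).getD c 0))).items).1
          == (g.getD r []).getD c 0) then (1:Int) else 0)]
  -- per column, the matches are the mode's multiplicity
  have step2 : ∀ c ∈ List.range (g.headD []).length,
      ((List.range g.length).map (fun r =>
        if ((pyMostCommon1 (PySem.Dict.counter ((List.range g.length).map
              (fun r' => (g.getD r' []).getD c 0))).items).1
            == (g.getD r []).getD c 0) then (1:Int) else 0)).sum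
      = (pyMostCommon1 (PySem.Dict.counter ((List.range g.length).map
            (fun r' => (g.getD r' []).getD c 0))).items).2 := by
    intro c _
    have e1 : (List.range g.length).map (fun r =>
        if ((pyMostCommon1 (PySem.Dict.counter ((List.range g.length).map
              (fun r' => (g.getD r' []).getD c 0))).items).1
            == (g.getD r []).getD c 0) then (1:Int) else 0)
        = (List.range (((List.range g.length).map (fun r' => (g.getD r' []).getD c 0)).length)).map
            (fun i => if ((pyMostCommon1 (PySem.Dict.counter ((List.range g.length).map
              (fun r' => (g.getD r' []).getD c 0))).items).1
            == ((List.range g.length).map (fun r' => (g.getD r' []).getD c 0)).getD i 0) then (1:Int) else 0) := by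
      rw [List.length_map, List.length_range]
      exact (List.map_congr_left (fun r hr => by
        rw [PySem.List.getD_map_range _ _ _ _ (List.mem_range.mp hr)])).symm
    rw [e1]
    exact sum_ind_eq_mc _ (hcolne c)
  rw [List.map_congr_left step2]
  -- per row, the matches are the mode's multiplicity
  have step3 : ∀ r ∈ List.range g.length,
      ((List.range (g.headD []).length).map (fun c =>
        if (((List.range g.length).map (fun r' =>
              (pyMostCommon1 (PySem.Dict.counter (g.getD r' [])).items).1)).getD r 0
            == (g.getD r []).getD c 0) then (1:Int) else 0)).sum
      = (pyMostCommon1 (PySem.Dict.counter (g.getD r [])).items).2 := by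
    intro r hr
    have hrlt := List.mem_range.mp hr
    rw [PySem.List.getD_map_range _ _ _ _ hrlt]
    rw [show (g.headD []).length = (g.getD r []).length from (hrowlen r hrlt).symm]
    exact sum_ind_eq_mc _ (hrowne r hrlt)
  rw [List.map_congr_left step3]
  -- the horizontal output rows
  have step4 : ∀ r ∈ List.range g.length,
      List.replicate (g.headD []).length
        (((List.range g.length).map (fun r' =>
            (pyMostCommon1 (PySem.Dict.counter (g.getD r' [])).items).1)).getD r 0)
      = List.replicate (g.headD []).length
          ((pyMostCommon1 (PySem.Dict.counter (g.getD r [])).items).1) := by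
    intro r hr
    rw [PySem.List.getD_map_range _ _ _ _ (List.mem_range.mp hr)]
  rw [List.map_congr_left step4]

theorem transform_alt_eq_canon (g : List (List Int)) (h : Pre_transform g) :
    transform_alt g = pvCanon g := by
  obtain ⟨hne, hh, hlen⟩ := h
  have hget0 : (PySem.List.pyGetD g 0 []) = g.headD [] := by
    rw [PySem.List.pyGetD_zero]
    cases g with | nil => exact absurd rfl hne | cons a t => rfl
  have hzip : pyZipStar g
      = (List.range (g.headD []).length).map (fun c => g.map (fun row => row.getD c 0)) := by
    match g, hne with
    | x :: t, _ =>
      show (List.range (((x :: t).map List.length).min?.getD 0)).map _ = _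
      have hmin : (((x :: t).map List.length).min?.getD 0) = ((x :: t).headD []).length := by
        rw [min?_all_eq _ ((x :: t).headD []).length (by simp)
          (fun z hz => by
            obtain ⟨row, hrow, rfl⟩ := List.mem_map.mp hz
            exact hlen row hrow)]
        rfl
      rw [hmin]
  unfold transform_alt pvCanon
  rw [hzip, hget0]
  rw [PySem.List.foldl_prod_mk
        (f := fun acc col => acc ++ [(pyMostCommon1 (PySem.Dict.counter col).items).1])
        (g := fun acc col => acc + (pyMostCommon1 (PySem.Dict.counter col).items).2),
      PySem.List.foldl_prod_mk
        (f := fun acc row => acc ++ [(pyMostCommon1 (PySem.Dict.counter row).items).1])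
        (g := fun acc row => acc + (pyMostCommon1 (PySem.Dict.counter row).items).2)]
  rw [PySem.List.foldl_append_singleton_eq_map, PySem.List.foldl_add,
      PySem.List.foldl_append_singleton_eq_map, PySem.List.foldl_add]
  have hcl : ∀ c : Nat, g.map (fun row => row.getD c 0)
      = (List.range g.length).map (fun r => (g.getD r []).getD c 0) :=
    fun c => map_eq_map_range g _ []
  simp only [List.nil_append, zero_add, List.map_map, Function.comp_def, mcMode, mcCnt, hcl,
    map_eq_map_range g (fun row => (pyMostCommon1 (PySem.Dict.counter row).items).1) [],
    map_eq_map_range g (fun row => (pyMostCommon1 (PySem.Dict.counter row).items).2) []]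

-- ===== VERDICT (by name: the statement is the Claim_ definition above) =====
theorem transform_spec : Claim_equal_transform := by
  intro g _ hpre
  unfold Spec_transform
  rw [transform_eq_canon g hpre, transform_alt_eq_canon g hpre]
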